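-- pv_equiv track=rewrite | github.com/meera-tbd/scrapper_job | script/scrape_staffaus.py | normalize_spacing
-- ===== SOURCE A (Python) =====
-- def normalize_spacing(text: str) -> str:
--     """Collapse excessive blank lines/spaces and strip trailing spaces per line."""
--     if not text:
--         return ""
--     # Trim spaces per line
--     lines = [ln.rstrip() for ln in text.splitlines()]
--     # Collapse multiple blank lines to a single blank line
--     out = []
--     blank = False
--     for ln in lines:
--         if ln.strip() == "":
--             if not blank:
--                 out.append("")
--             blank = True
--         else:
--             out.append(ln)
--             blank = False
--     return "\n".join(out).strip()
-- ===== SOURCE B (Python) =====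
-- def normalize_spacing(text: str) -> str:
--     """Collapse excessive blank lines/spaces and strip trailing spaces per line."""
--     if not text:
--         return ""
--     lines = [ln.rstrip() for ln in text.splitlines()]
--     # Two-pointer scan: extract each maximal run of non-blank lines as a
--     # paragraph, then rejoin the paragraphs with a single blank line between
--     # them.  (After rstrip a blank line is exactly "".)
--     n = len(lines)
--     paragraphs = []
--     i = 0
--     while i < n:
--         if lines[i] == "":
--             i += 1
--             continue
--         j = i
--         while j < n and lines[j] != "":
--             j += 1
--         paragraphs.append("\n".join(lines[i:j]))
--         i = j
--     return "\n\n".join(paragraphs).strip()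
-- ===== Notes on version B (the rewrite author's own statement) =====
-- stated objective: alternative
-- what changed: Replaces A's single-pass stateful filter (a blank flag deciding line by line which lines to emit into one flat newline-joined stream) by a two-pointer run scanner that extracts each maximal run of non-blank lines as a paragraph and rejoins the paragraphs with a single blank line between them.
import Mathlib
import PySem

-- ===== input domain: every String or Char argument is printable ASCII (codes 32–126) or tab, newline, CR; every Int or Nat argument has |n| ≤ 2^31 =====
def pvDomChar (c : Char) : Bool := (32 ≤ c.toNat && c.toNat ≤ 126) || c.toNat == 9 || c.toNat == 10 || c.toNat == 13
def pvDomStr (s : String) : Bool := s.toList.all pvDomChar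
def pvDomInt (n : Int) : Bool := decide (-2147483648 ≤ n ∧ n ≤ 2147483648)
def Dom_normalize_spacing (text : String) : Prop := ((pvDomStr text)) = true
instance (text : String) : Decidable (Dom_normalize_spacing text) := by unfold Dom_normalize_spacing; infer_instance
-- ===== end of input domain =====

-- B replaces A's stateful blank-flag filter by a two-pointer scanner that extracts
-- maximal runs of non-blank lines as paragraphs and rejoins them with "\n\n"; same O(n) cost.

-- ===== PORT A =====
def normalize_spacing (text : String) : String :=
  if text = "" then ""
  else
    let lines := (PySem.Str.splitlines text).map PySem.Str.rstrip
    let st := lines.foldl (fun (s : List String × Bool) ln =>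
      if PySem.Str.strip ln == "" then
        if !s.2 then (s.1 ++ [""], true) else (s.1, true)
      else (s.1 ++ [ln], false)) ([], false)
    PySem.Str.strip (PySem.Str.join "\n" st.1)

-- ===== PORT B =====
-- the inner `while j < n and lines[j] != "": j += 1` of Source B
def pvScan (lines : List String) (n : Nat) (j : Nat) : Nat :=
  if _h : j < n ∧ lines.getD j "" ≠ "" then pvScan lines n (j + 1) else j
termination_by n - j

theorem pvScan_ge (lines : List String) (n j : Nat) : j ≤ pvScan lines n j := by
  have key : ∀ m j, n - j ≤ m → j ≤ pvScan lines n j := by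
    intro m
    induction m with
    | zero =>
      intro j hj
      rw [pvScan]
      split
      · next h => omega
      · omega
    | succ m ih =>
      intro j hj
      rw [pvScan]
      split
      · next h =>
        have := ih (j + 1) (by omega)
        omega
      · omega
  exact key n j (by omega)

-- termination fact for the outer loop, cited by name in its decreasing_by
theorem pvScan_lt (lines : List String) (n i : Nat) (hi : i < n)
    (hl : lines.getD i "" ≠ "") : i < pvScan lines n i := by
  rw [pvScan, dif_pos ⟨hi, hl⟩]
  have := pvScan_ge lines n (i + 1)
  omega

-- the outer `while i < n` loop of Source B, accumulating paragraphs
def pvParasGo (lines : List String) (n i : Nat) (acc : List String) : List String :=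
  if hi : i < n then
    if lines.getD i "" = "" then pvParasGo lines n (i + 1) acc
    else
      -- lines[i:j] with 0 ≤ i ≤ j: exact as drop/take
      pvParasGo lines n (pvScan lines n i)
        (acc ++ [PySem.Str.join "\n" ((lines.drop i).take (pvScan lines n i - i))])
  else acc
termination_by n - i
decreasing_by
  · omega
  · have := pvScan_lt lines n i hi (by assumption)
    omega

def normalize_spacing_alt (text : String) : String :=
  if text = "" then ""
  else
    let lines := (PySem.Str.splitlines text).map PySem.Str.rstrip
    PySem.Str.strip (PySem.Str.join "\n\n" (pvParasGo lines lines.length 0 []))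

-- ===== PRECONDITION & SPEC =====
def Spec_normalize_spacing (text : String) (out : String) : Prop := out = normalize_spacing_alt text
instance (text : String) (out : String) : Decidable (Spec_normalize_spacing text out) := by unfold Spec_normalize_spacing; infer_instance

-- ===== CLAIM (what is proved, stated in full; the proofs are below) =====
def Claim_equal_normalize_spacing : Prop := ∀ (text : String), Dom_normalize_spacing text → Spec_normalize_spacing text (normalize_spacing text)

-- ===== LEMMAS AND PROOFS =====

-- A's stream, as a structural recursion (flag b = the `blank` variable)
def pvFA : List String → Bool → List String
  | [], _ => []
  | ln :: rest, b =>
    if PySem.Str.strip ln == "" then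
      (if !b then "" :: pvFA rest true else pvFA rest true)
    else ln :: pvFA rest false

-- B's paragraphs, as a structural recursion on the line list
def pvPB : List String → List String
  | [] => []
  | l :: r =>
    if l = "" then pvPB r
    else PySem.Str.join "\n" (l :: r.takeWhile (fun x => x ≠ "")) ::
         pvPB (r.dropWhile (fun x => x ≠ ""))
termination_by lines => lines.length
decreasing_by
  · simp only [List.length_cons]
    omega
  · simp only [List.length_cons]
    have h1 := List.length_dropWhile_le (fun x : String => decide (x ≠ "")) r
    have h2 := List.length_dropWhile_le (fun x : String => !decide (x = "")) r
    omega

def pvPre (b : Bool) (lines : List String) : String :=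
  if b then "" else if lines.head? = some "" ∧ pvPB lines ≠ [] then "\n" else ""

def pvSuf (lines : List String) : String :=
  if pvPB lines ≠ [] ∧ lines.getLast? = some "" then "\n" else ""

-- join lemmas
theorem pvJoin_nil (sep : String) : PySem.Str.join sep [] = "" := by
  simp [PySem.Str.join, PySem.Chars.join, List.intercalate]

theorem pvJoin_singleton (sep a : String) : PySem.Str.join sep [a] = a := by
  simp [PySem.Str.join, PySem.Chars.join, List.intercalate]

theorem pvJoin_cons (sep a : String) (xs : List String) (h : xs ≠ []) :
    PySem.Str.join sep (a :: xs) = a ++ sep ++ PySem.Str.join sep xs := by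
  cases xs with
  | nil => exact absurd rfl h
  | cons b t =>
    apply String.toList_inj.mp
    simp [PySem.Str.join, PySem.Chars.join, List.intercalate]

-- strip absorbs a newline at either end
theorem pvStrip_nl_left (s : String) : PySem.Str.strip ("\n" ++ s) = PySem.Str.strip s := by
  simp [PySem.Str.strip, PySem.Chars.strip, PySem.Chars.lstrip, PySem.Chars.isspace]

theorem pv_rstrip_append_nl (l : List Char) :
    PySem.Chars.rstrip (l ++ ['\n']) = PySem.Chars.rstrip l := by
  simp [PySem.Chars.rstrip, PySem.Chars.isspace]

theorem pvStrip_nl_right (s : String) : PySem.Str.strip (s ++ "\n") = PySem.Str.strip s := by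
  have key : PySem.Chars.strip (s.toList ++ ['\n']) = PySem.Chars.strip s.toList := by
    unfold PySem.Chars.strip PySem.Chars.lstrip
    rw [List.dropWhile_append]
    split
    · next he =>
      have h0 : List.dropWhile PySem.Chars.isspace s.toList = [] := by simpa using he
      rw [h0]
      simp [PySem.Chars.rstrip, PySem.Chars.isspace]
    · exact pv_rstrip_append_nl _
  have htl : (s ++ "\n").toList = s.toList ++ ['\n'] := by simp
  simp [PySem.Str.strip, htl, key]

-- rstrip l = [] iff every char of l is whitespace
theorem pv_rstrip_eq_nil_iff (l : List Char) :
    PySem.Chars.rstrip l = [] ↔ ∀ c ∈ l, PySem.Chars.isspace c := by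
  simp [PySem.Chars.rstrip, List.dropWhile_eq_nil_iff]

-- if every char of rstrip l is whitespace, rstrip l is empty
theorem pv_rstrip_all_space (l : List Char)
    (h : ∀ c ∈ PySem.Chars.rstrip l, PySem.Chars.isspace c) :
    PySem.Chars.rstrip l = [] := by
  unfold PySem.Chars.rstrip at *
  cases hd : List.dropWhile PySem.Chars.isspace l.reverse with
  | nil => simp
  | cons a t =>
      exfalso
      have hna : ¬ (PySem.Chars.isspace a = true) := by
        have := List.head_dropWhile_not (p := PySem.Chars.isspace) (l := l.reverse)
          (by simp [hd])
        simpa [hd] using this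
      exact hna (h a (by simp [hd]))

-- the key blankness fact: after rstrip, strip-blank coincides with empty
theorem pv_blank_iff (x : String) :
    (PySem.Str.strip (PySem.Str.rstrip x) == "") = (PySem.Str.rstrip x == "") := by
  have key : PySem.Chars.strip (PySem.Chars.rstrip x.toList) = [] ↔
      PySem.Chars.rstrip x.toList = [] := by
    constructor
    · intro h
      apply pv_rstrip_all_space
      intro c hc
      unfold PySem.Chars.strip at h
      have hall : ∀ c ∈ PySem.Chars.lstrip (PySem.Chars.rstrip x.toList),
          PySem.Chars.isspace c = true := by
        intro c hc2
        exact (pv_rstrip_eq_nil_iff _).1 h c hc2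
      rw [← List.takeWhile_append_dropWhile (p := PySem.Chars.isspace)
        (l := PySem.Chars.rstrip x.toList)] at hc
      rcases List.mem_append.1 hc with h1 | h1
      · exact List.mem_takeWhile_imp h1
      · exact hall c h1
    · intro h
      rw [h]
      simp [PySem.Chars.strip, PySem.Chars.lstrip, PySem.Chars.rstrip]
  have h1 : (PySem.Str.strip (PySem.Str.rstrip x)).toList =
      PySem.Chars.strip (PySem.Chars.rstrip x.toList) := by simp
  by_cases hb : PySem.Chars.rstrip x.toList = []
  · have e1 : PySem.Str.strip (PySem.Str.rstrip x) = "" :=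
      String.toList_inj.mp (by simp [h1, key.2 hb])
    have e2 : PySem.Str.rstrip x = "" := String.toList_inj.mp (by simpa using hb)
    rw [e2] at e1 ⊢
    simp [e1]
  · have e1 : PySem.Str.strip (PySem.Str.rstrip x) ≠ "" := by
      intro h; exact hb (key.1 (by rw [← h1, h]; simp))
    have e2 : PySem.Str.rstrip x ≠ "" := by
      intro h; exact hb (by simpa using congrArg String.toList h)
    simp [e1, e2]

-- A's foldl equals pvFA
theorem pv_foldA (L : List String) (acc : List String) (b : Bool) :
    (L.foldl (fun (s : List String × Bool) ln =>
      if PySem.Str.strip ln == "" then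
        if !s.2 then (s.1 ++ [""], true) else (s.1, true)
      else (s.1 ++ [ln], false)) (acc, b)).1 = acc ++ pvFA L b := by
  induction L generalizing acc b with
  | nil => simp [pvFA]
  | cons l rest ih =>
      cases hc : (PySem.Str.strip l == "") with
      | true =>
        cases b
        · simp only [List.foldl_cons, hc, Bool.not_false, if_true, ite_true]
          rw [ih]
          simp [pvFA, hc]
        · simp only [List.foldl_cons, hc, Bool.not_true, if_false, ite_true, ite_false]
          rw [ih]
          simp [pvFA, hc]
      | false =>
        simp only [List.foldl_cons, hc, ite_false, Bool.false_eq_true]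
        rw [ih]
        simp [pvFA, hc]

-- equation lemmas for pvPB
theorem pvPB_nil : pvPB [] = [] := by rw [pvPB]

theorem pvPB_cons_blank (r : List String) : pvPB ("" :: r) = pvPB r := by
  rw [pvPB]; simp

theorem pvPB_cons (l : String) (r : List String) (h : l ≠ "") :
    pvPB (l :: r) = PySem.Str.join "\n" (l :: r.takeWhile (fun x => x ≠ "")) ::
      pvPB (r.dropWhile (fun x => x ≠ "")) := by
  rw [pvPB]; simp [h]

-- take/drop by the takeWhile length
theorem pv_take_takeWhile {α : Type} (p : α → Bool) (l : List α) :
    l.take ((l.takeWhile p).length) = l.takeWhile p := by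
  induction l with
  | nil => simp
  | cons a t ih =>
    by_cases h : p a = true
    · simp [List.takeWhile_cons, h, ih]
    · simp [List.takeWhile_cons, h]

theorem pv_drop_takeWhile {α : Type} (p : α → Bool) (l : List α) :
    l.drop ((l.takeWhile p).length) = l.dropWhile p := by
  induction l with
  | nil => simp
  | cons a t ih =>
    by_cases h : p a = true
    · simp [List.takeWhile_cons, List.dropWhile_cons, h, ih]
    · simp [List.takeWhile_cons, List.dropWhile_cons, h]

-- pvScan computes i + length of the non-blank run at i
theorem pv_scan_eq (lines : List String) (i : Nat) :
    pvScan lines lines.length i =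
      i + ((lines.drop i).takeWhile (fun x => x ≠ "")).length := by
  have key : ∀ m i, lines.length - i ≤ m →
      pvScan lines lines.length i =
        i + ((lines.drop i).takeWhile (fun x => x ≠ "")).length := by
    intro m
    induction m with
    | zero =>
      intro i hm
      have hge : lines.length ≤ i := by omega
      rw [pvScan]
      rw [dif_neg (by omega)]
      rw [List.drop_eq_nil_of_le hge]
      simp
    | succ m ih =>
      intro i hm
      by_cases hi : i < lines.length
      · have hdrop : lines.drop i = lines[i] :: lines.drop (i + 1) :=
          List.drop_eq_getElem_cons hi
        have hgetD : lines.getD i "" = lines[i] := List.getD_eq_getElem lines "" hi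
        by_cases hb : lines[i] = ""
        · rw [pvScan, dif_neg (by rw [hgetD]; simp [hb])]
          rw [hdrop, List.takeWhile_cons]
          simp [hb]
        · rw [pvScan, dif_pos ⟨hi, by rw [hgetD]; exact hb⟩]
          rw [ih (i + 1) (by omega)]
          rw [hdrop, List.takeWhile_cons]
          simp [hb]
          omega
      · rw [pvScan, dif_neg (by omega)]
        rw [List.drop_eq_nil_of_le (by omega)]
        simp
  exact key lines.length i (by omega)

-- pvParasGo computes pvPB of the remaining suffix
theorem pv_go_eq (lines : List String) (i : Nat) (acc : List String) :
    pvParasGo lines lines.length i acc = acc ++ pvPB (lines.drop i) := by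
  have key : ∀ m i acc, lines.length - i ≤ m →
      pvParasGo lines lines.length i acc = acc ++ pvPB (lines.drop i) := by
    intro m
    induction m with
    | zero =>
      intro i acc hm
      rw [pvParasGo, dif_neg (by omega)]
      rw [List.drop_eq_nil_of_le (by omega), pvPB_nil, List.append_nil]
    | succ m ih =>
      intro i acc hm
      by_cases hi : i < lines.length
      · have hdrop : lines.drop i = lines[i] :: lines.drop (i + 1) :=
          List.drop_eq_getElem_cons hi
        have hgetD : lines.getD i "" = lines[i] := List.getD_eq_getElem lines "" hi
        rw [pvParasGo, dif_pos hi]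
        by_cases hb : lines[i] = ""
        · rw [if_pos (by rw [hgetD, hb])]
          rw [ih (i + 1) acc (by omega), hdrop, hb, pvPB_cons_blank]
        · rw [if_neg (by rw [hgetD]; exact hb)]
          have hscan := pv_scan_eq lines i
          set t := ((lines.drop i).takeWhile (fun x => x ≠ "")).length with ht
          have htpos : 1 ≤ t := by
            rw [ht, hdrop, List.takeWhile_cons]
            simp [hb]
          have htle : t ≤ lines.length - i := by
            have h1 : t ≤ (lines.drop i).length := by
              rw [ht]; exact (List.takeWhile_prefix _).length_le
            simpa using h1
          rw [hscan]
          have hsub : i + t - i = t := by omega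
          rw [hsub]
          rw [ih (i + t) _ (by omega)]
          have htake : (lines.drop i).take t = (lines.drop i).takeWhile (fun x => x ≠ "") := by
            rw [ht]; exact pv_take_takeWhile _ _
          have hdrop2 : lines.drop (i + t) = (lines.drop i).dropWhile (fun x => x ≠ "") := by
            rw [← List.drop_drop]
            · rw [ht]; exact pv_drop_takeWhile _ _
          rw [htake, hdrop2]
          have h1 : (lines.drop i).takeWhile (fun x => x ≠ "") =
              lines[i] :: (lines.drop (i + 1)).takeWhile (fun x => x ≠ "") := by
            rw [hdrop, List.takeWhile_cons]; simp [hb]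
          have h2 : (lines.drop i).dropWhile (fun x => x ≠ "") =
              (lines.drop (i + 1)).dropWhile (fun x => x ≠ "") := by
            rw [hdrop, List.dropWhile_cons]; simp [hb]
          rw [h1, h2]
          conv_rhs => rw [hdrop, pvPB_cons lines[i] _ hb]
          simp
      · rw [pvParasGo, dif_neg (by omega)]
        rw [List.drop_eq_nil_of_le (by omega), pvPB_nil, List.append_nil]
  exact key lines.length i acc (by omega)

-- emptiness characterisations
theorem pvPB_eq_nil_iff (lines : List String) :
    pvPB lines = [] ↔ ∀ l ∈ lines, l = "" := by
  have key : ∀ m L, List.length L ≤ m → (pvPB L = [] ↔ ∀ l ∈ L, l = "") := by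
    intro m
    induction m with
    | zero =>
      intro L hL
      have : L = [] := List.eq_nil_of_length_eq_zero (by omega)
      subst this
      simp [pvPB_nil]
    | succ m ih =>
      intro L hL
      cases L with
      | nil => simp [pvPB_nil]
      | cons l r =>
        by_cases hl : l = ""
        · subst hl
          rw [pvPB_cons_blank, ih r (by simp at hL; omega)]
          simp
        · rw [pvPB_cons l r hl]
          simp [hl]
  exact key lines.length lines le_rfl

theorem pvFA_true_eq_nil (lines : List String)
    (H : ∀ l ∈ lines, (PySem.Str.strip l == "") = (l == "")) :
    (pvFA lines true = [] ↔ ∀ l ∈ lines, l = "") := by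
  induction lines with
  | nil => simp [pvFA]
  | cons l rest ih =>
    have Hl := H l (by simp)
    have Hrest : ∀ x ∈ rest, (PySem.Str.strip x == "") = (x == "") :=
      fun x hx => H x (by simp [hx])
    by_cases hb : l = ""
    · subst hb
      simp [pvFA, Hl, ih Hrest]
    · simp [pvFA, Hl, hb]

-- all-blank lists end in a blank
theorem pv_getLast_blank (L : List String) (h : ∀ x ∈ L, x = "") (hne : L ≠ []) :
    L.getLast? = some "" := by
  rw [List.getLast?_eq_some_getLast hne]
  exact congrArg some (h _ (List.getLast_mem hne))

-- pvFA of a cons with flag false is never empty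
theorem pvFA_cons_false_ne_nil (x : String) (xs : List String) :
    pvFA (x :: xs) false ≠ [] := by
  simp only [pvFA]
  split <;> simp

-- join "\n\n" over pvPB absorbs a leading line glued to a non-blank successor
theorem pv_join2_cons (l r : String) (rs : List String) (hl : l ≠ "") (hr : r ≠ "") :
    PySem.Str.join "\n\n" (pvPB (l :: r :: rs)) =
      l ++ "\n" ++ PySem.Str.join "\n\n" (pvPB (r :: rs)) := by
  rw [pvPB_cons l (r :: rs) hl, pvPB_cons r rs hr]
  rw [List.takeWhile_cons, List.dropWhile_cons]
  have hc : (decide (r ≠ "") = true) := by simp [hr]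
  rw [if_pos hc, if_pos hc]
  have hj : PySem.Str.join "\n" (l :: r :: (rs.takeWhile (fun x => x ≠ ""))) =
      l ++ "\n" ++ PySem.Str.join "\n" (r :: (rs.takeWhile (fun x => x ≠ ""))) :=
    pvJoin_cons _ _ _ (by simp)
  cases hPB : pvPB (rs.dropWhile (fun x => x ≠ "")) with
  | nil => rw [pvJoin_singleton, pvJoin_singleton, hj]
  | cons y ys =>
    rw [hj, pvJoin_cons "\n\n" _ (y :: ys) (by simp), pvJoin_cons "\n\n" _ (y :: ys) (by simp)]
    simp [String.append_assoc]

-- the main correspondence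
theorem pv_main (lines : List String)
    (H : ∀ l ∈ lines, (PySem.Str.strip l == "") = (l == "")) (b : Bool) :
    PySem.Str.join "\n" (pvFA lines b) =
      pvPre b lines ++ PySem.Str.join "\n\n" (pvPB lines) ++ pvSuf lines := by
  induction lines generalizing b with
  | nil =>
    cases b <;> simp [pvFA, pvPB_nil, pvPre, pvSuf, pvJoin_nil]
  | cons l rest ih =>
    have Hl := H l (by simp)
    have Hrest : ∀ x ∈ rest, (PySem.Str.strip x == "") = (x == "") :=
      fun x hx => H x (by simp [hx])
    by_cases hl : l = ""
    · subst hl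
      have hs : (PySem.Str.strip "" == "") = true := by rw [Hl]; rfl
      cases b with
      | true =>
        have hFA : pvFA ("" :: rest) true = pvFA rest true := by simp [pvFA, hs]
        rw [hFA, ih Hrest true]
        have hpre : ∀ L, pvPre true L = "" := fun L => rfl
        rw [hpre, hpre, pvPB_cons_blank]
        cases rest with
        | nil => simp [pvSuf, pvPB_nil, pvPB_cons_blank]
        | cons r rs =>
          have hsuf : pvSuf ("" :: r :: rs) = pvSuf (r :: rs) := by
            unfold pvSuf
            rw [pvPB_cons_blank, List.getLast?_cons_cons]
          rw [hsuf]
      | false =>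
        have hFA : pvFA ("" :: rest) false = "" :: pvFA rest true := by simp [pvFA, hs]
        rw [hFA]
        by_cases hall : ∀ x ∈ rest, x = ""
        · have hFAnil : pvFA rest true = [] := (pvFA_true_eq_nil rest Hrest).2 hall
          have hPBnil2 : pvPB ("" :: rest) = [] := by
            rw [pvPB_cons_blank]; exact (pvPB_eq_nil_iff rest).2 hall
          rw [hFAnil, pvJoin_singleton]
          simp [pvPre, pvSuf, hPBnil2, pvJoin_nil]
        · have hFAne : pvFA rest true ≠ [] := by
            intro hnil; exact hall ((pvFA_true_eq_nil rest Hrest).1 hnil)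
          have hPBne : pvPB rest ≠ [] := by
            intro hnil; exact hall ((pvPB_eq_nil_iff rest).1 hnil)
          have hrne : rest ≠ [] := by
            intro he; subst he; exact hall (by simp)
          rw [pvJoin_cons "\n" "" _ hFAne, ih Hrest true]
          have hPBc : pvPB ("" :: rest) = pvPB rest := pvPB_cons_blank rest
          have hpre2 : pvPre false ("" :: rest) = "\n" := by
            simp [pvPre, hPBc, hPBne]
          have hpre1 : pvPre true rest = "" := rfl
          have hsuf : pvSuf ("" :: rest) = pvSuf rest := by
            unfold pvSuf
            rw [hPBc]
            cases rest with
            | nil => exact absurd rfl hrne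
            | cons r rs => rw [List.getLast?_cons_cons]
          rw [hpre1, hpre2, hPBc, hsuf]
          simp [String.append_assoc]
    · have hs : (PySem.Str.strip l == "") = false := by rw [Hl]; simp [hl]
      have hFA : pvFA (l :: rest) b = l :: pvFA rest false := by simp [pvFA, hs]
      rw [hFA]
      have hpreb : pvPre b (l :: rest) = "" := by
        cases b
        · simp [pvPre, hl]
        · rfl
      cases rest with
      | nil =>
        have h0 : pvFA ([] : List String) false = [] := rfl
        rw [h0, pvJoin_singleton]
        rw [pvPB_cons l [] hl]
        simp only [List.takeWhile_nil, List.dropWhile_nil, pvPB_nil]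
        rw [pvJoin_singleton, pvJoin_singleton]
        have hsuf : pvSuf [l] = "" := by simp [pvSuf, hl]
        rw [hpreb, hsuf]
        simp
      | cons r rs =>
        have hFAne : pvFA (r :: rs) false ≠ [] := pvFA_cons_false_ne_nil r rs
        rw [pvJoin_cons "\n" l _ hFAne, ih Hrest false]
        by_cases hr : r = ""
        · subst hr
          have hPBl : pvPB (l :: "" :: rs) = l :: pvPB ("" :: rs) := by
            rw [pvPB_cons l ("" :: rs) hl]
            rw [List.takeWhile_cons, List.dropWhile_cons]
            simp [pvJoin_singleton]
          by_cases hall : pvPB ("" :: rs) = []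
          · have hallr : ∀ x ∈ ("" :: rs : List String), x = "" :=
              (pvPB_eq_nil_iff _).1 hall
            have hpre : pvPre false ("" :: rs) = "" := by simp [pvPre, hall]
            have hsufr : pvSuf ("" :: rs) = "" := by simp [pvSuf, hall]
            rw [hpre, hall, pvJoin_nil, hsufr]
            rw [hPBl, hall, pvJoin_singleton]
            have hsufl : pvSuf (l :: "" :: rs) = "\n" := by
              unfold pvSuf
              rw [hPBl, hall, List.getLast?_cons_cons]
              have hgl := pv_getLast_blank ("" :: rs) hallr (by simp)
              simp [hgl]
            rw [hpreb, hsufl]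
            simp
          · have hpre : pvPre false ("" :: rs) = "\n" := by simp [pvPre, hall]
            have hsuf : pvSuf (l :: "" :: rs) = pvSuf ("" :: rs) := by
              unfold pvSuf
              rw [hPBl, List.getLast?_cons_cons]
              simp [hall]
            rw [hpre, hPBl, pvJoin_cons "\n\n" l _ hall, hpreb, hsuf]
            have habs : ∀ X : String, "\n" ++ ("\n" ++ X) = "\n\n" ++ X := by
              intro X
              rw [← String.append_assoc]
              exact congrArg (· ++ X) (by decide)
            simp [String.append_assoc, habs]
        · have hPBne : pvPB (r :: rs) ≠ [] := by rw [pvPB_cons r rs hr]; simp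
          have hpre : pvPre false (r :: rs) = "" := by simp [pvPre, hr]
          have hsuf : pvSuf (l :: r :: rs) = pvSuf (r :: rs) := by
            unfold pvSuf
            rw [List.getLast?_cons_cons]
            have h1 : pvPB (l :: r :: rs) ≠ [] := by rw [pvPB_cons l _ hl]; simp
            simp [h1, hPBne]
          rw [hpre, pv_join2_cons l r rs hl hr, hpreb, hsuf]
          simp [String.append_assoc]

-- ===== VERDICT (by name: the statement is the Claim_ definition above) =====
theorem normalize_spacing_spec : Claim_equal_normalize_spacing := by
  intro text _
  unfold Spec_normalize_spacing normalize_spacing normalize_spacing_alt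
  by_cases h : text = ""
  · simp [h]
  · simp only [if_neg h]
    set lines := (PySem.Str.splitlines text).map PySem.Str.rstrip with hl
    have H : ∀ l ∈ lines, (PySem.Str.strip l == "") = (l == "") := by
      intro l hml
      rcases List.mem_map.1 hml with ⟨x, _, rfl⟩
      exact pv_blank_iff x
    rw [pv_foldA lines [] false, pv_go_eq lines 0 [], List.nil_append,
        List.drop_zero, pv_main lines H false]
    unfold pvPre pvSuf
    split_ifs <;> simp [pvStrip_nl_left, pvStrip_nl_right]
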